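-- pv_equiv track=rewrite | github.com/Luolingwei/LeetCode | String/Q792_Number of Matching Subsequences.py | numMatchingSubseq1
-- ===== SOURCE A (Python) =====
-- from collections import Counter, defaultdict
--
-- def numMatchingSubseq1(s, words):
--     def check(w, s):
--         i, j, m, n = 0, 0, len(w), len(s)
--         while i < m and j < n:
--             while j < n and s[j] != w[i]:
--                 j += 1
--             if j < n:
--                 i += 1
--                 j += 1
--         return i == m
--
--     count, res = Counter(words), 0
--
--     for w in count.keys():
--         if check(w, s):
--             res += count[w]
--     return res
-- ===== SOURCE B (Python) =====
-- from collections import defaultdict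
--
-- def numMatchingSubseq1(s, words):
--     res = 0
--     buckets = defaultdict(list)          # next needed char -> list of remaining suffixes
--     for w in words:
--         if w:
--             buckets[w[0]].append(w[1:])
--         else:
--             res += 1
--     for c in s:                          # single sweep over s
--         for suf in buckets.pop(c, []):
--             if suf:
--                 buckets[suf[0]].append(suf[1:])
--             else:
--                 res += 1
--     return res
-- ===== Notes on version B (the rewrite author's own statement) =====
-- stated objective: faster
-- what changed: B replaces A's per-distinct-word two-pointer scan of s by the bucket sweep: words are grouped in a dict keyed by their next needed character and s is traversed exactly once, re-bucketing each advanced suffix, so no word ever rescans s.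
import Mathlib
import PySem

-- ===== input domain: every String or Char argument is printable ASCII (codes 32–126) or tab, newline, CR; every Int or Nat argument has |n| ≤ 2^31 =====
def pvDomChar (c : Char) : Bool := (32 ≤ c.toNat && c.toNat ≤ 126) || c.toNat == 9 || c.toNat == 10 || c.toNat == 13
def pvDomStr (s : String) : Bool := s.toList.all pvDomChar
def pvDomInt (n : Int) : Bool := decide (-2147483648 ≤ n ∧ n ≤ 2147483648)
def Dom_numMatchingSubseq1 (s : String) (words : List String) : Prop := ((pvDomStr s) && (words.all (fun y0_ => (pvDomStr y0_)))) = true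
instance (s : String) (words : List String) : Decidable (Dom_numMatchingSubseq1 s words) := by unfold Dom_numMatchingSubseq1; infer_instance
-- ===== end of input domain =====

-- B replaces A's per-word two-pointer scans of s by a single sweep of s with words bucketed
-- by their next needed character (faster: O(|s| + total word length) instead of O(U*|s|)).

-- ===== PORT A =====
-- inner while loop of check: `while j < n and s[j] != w[i]: j += 1`
-- (fuel only makes the loop total; with fuel ≥ s.length - j it never runs out)
def innerGo (s : List Char) (c : Char) : Nat → Nat → Nat
  | 0, j => j
  | fuel + 1, j =>
    if h : j < s.length then
      if s[j] ≠ c then innerGo s c fuel (j + 1) else j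
    else j

def innerA (s : List Char) (c : Char) (j : Nat) : Nat := innerGo s c (s.length - j) j

-- outer while loop of check, returning the final i (same fuel discipline)
def outerGo (w s : List Char) : Nat → Nat → Nat → Nat
  | 0, i, _ => i
  | fuel + 1, i, j =>
    if h : i < w.length ∧ j < s.length then
      let j' := innerA s (w[i]'h.1) j
      if j' < s.length then outerGo w s fuel (i + 1) (j' + 1) else i
    else i

-- check(w, s): `return i == m`
def checkA (w s : List Char) : Bool := decide (outerGo w s s.length 0 0 = w.length)

def numMatchingSubseq1 (s : String) (words : List String) : Int :=
  let count := PySem.Dict.counter words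
  count.keys.foldl
    (fun res w => if checkA w.toList s.toList then res + count.getD w 0 else res) 0

-- ===== PORT B =====
-- body of both of Source B's bucket loops: an empty suffix is fully matched (res += 1),
-- a nonempty one waits in the bucket of its next needed character
def pvStep (st : Int × PySem.Dict Char (List (List Char))) (suf : List Char) :
    Int × PySem.Dict Char (List (List Char)) :=
  match suf with
  | [] => (st.1 + 1, st.2)
  | c :: t => (st.1, st.2.modify c [] (· ++ [t]))

def numMatchingSubseq1_alt (s : String) (words : List String) : Int :=
  -- `for w in words: …` (seed the buckets)
  let init := words.foldl (fun st w => pvStep st w.toList)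
    ((0 : Int), (PySem.Dict.empty : PySem.Dict Char (List (List Char))))
  -- `for c in s: for suf in buckets.pop(c, []): …` (single sweep over s)
  let fin := s.toList.foldl
    (fun st c => (st.2.getD c []).foldl pvStep (st.1, st.2.erase c)) init
  fin.1

-- ===== PRECONDITION & SPEC =====
def Spec_numMatchingSubseq1 (s : String) (words : List String) (out : Int) : Prop := out = numMatchingSubseq1_alt s words
instance (s : String) (words : List String) (out : Int) : Decidable (Spec_numMatchingSubseq1 s words out) := by unfold Spec_numMatchingSubseq1; infer_instance

-- ===== CLAIM (what is proved, stated in full; the proofs are below) =====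
def Claim_equal_numMatchingSubseq1 : Prop := ∀ (s : String) (words : List String), Dom_numMatchingSubseq1 s words → Spec_numMatchingSubseq1 s words (numMatchingSubseq1 s words)

-- ===== LEMMAS AND PROOFS =====

-- greedy subsequence test, the common specification both ports are reduced to
def dropTo (c : Char) : List Char → Option (List Char)
  | [] => none
  | x :: t => if x = c then some t else dropTo c t

def isSub : List Char → List Char → Bool
  | [], _ => true
  | c :: w', ss =>
    match dropTo c ss with
    | some rest => isSub w' rest
    | none => false

-- ---- A-side: checkA = isSub ----

theorem le_innerGo (s : List Char) (c : Char) (fuel j : Nat) : j ≤ innerGo s c fuel j := by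
  induction fuel generalizing j with
  | zero => exact le_refl j
  | succ fuel ih =>
    unfold innerGo
    split
    · split
      · exact le_trans (Nat.le_succ j) (ih (j + 1))
      · exact le_refl j
    · exact le_refl j

theorem dropTo_innerGo (s : List Char) (c : Char) (fuel j : Nat)
    (hk : s.length - j ≤ fuel) (hj : j ≤ s.length) :
    dropTo c (s.drop j) =
      if innerGo s c fuel j < s.length then some (s.drop (innerGo s c fuel j + 1)) else none := by
  induction fuel generalizing j with
  | zero =>
    have hje : j = s.length := by omega
    subst hje
    simp [List.drop_length, dropTo, innerGo]
  | succ fuel ih =>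
    rcases lt_or_eq_of_le hj with h | h
    · rw [List.drop_eq_getElem_cons h]
      by_cases hc : s[j] = c
      · rw [innerGo, dif_pos h, if_neg (not_not_intro hc)]
        simp [dropTo, hc, h]
      · rw [innerGo, dif_pos h, if_pos hc]
        have := ih (j + 1) (by omega) h
        simpa [dropTo, hc] using this
    · subst h
      rw [innerGo, dif_neg (by omega)]
      simp [List.drop_length, dropTo]

theorem dropTo_innerA (s : List Char) (c : Char) (j : Nat) (hj : j ≤ s.length) :
    dropTo c (s.drop j) =
      if innerA s c j < s.length then some (s.drop (innerA s c j + 1)) else none :=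
  dropTo_innerGo s c (s.length - j) j (le_refl _) hj

theorem outerGo_eq_isSub (w s : List Char) (fuel i j : Nat)
    (hk : s.length - j ≤ fuel) (hi : i ≤ w.length) (hj : j ≤ s.length) :
    (outerGo w s fuel i j = w.length) ↔ isSub (w.drop i) (s.drop j) = true := by
  induction fuel generalizing i j with
  | zero =>
    have hje : j = s.length := by omega
    subst hje
    rw [show outerGo w s 0 i s.length = i from rfl]
    rcases lt_or_eq_of_le hi with hiw | hiw
    · rw [List.drop_eq_getElem_cons hiw, List.drop_length]
      simp [isSub, dropTo]
      omega
    · subst hiw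
      simp [List.drop_length, isSub]
  | succ fuel ih =>
    rcases lt_or_eq_of_le hi with hiw | hiw
    · by_cases hjs : j < s.length
      · rw [outerGo, dif_pos ⟨hiw, hjs⟩]
        have hd := dropTo_innerA s w[i] j hj
        have hjj := le_innerGo s w[i] (s.length - j) j
        rw [List.drop_eq_getElem_cons hiw]
        by_cases hlt : innerA s w[i] j < s.length
        · rw [if_pos hlt] at hd ⊢
          simp only [isSub, hd]
          have hjj' : j ≤ innerA s w[i] j := hjj
          exact ih (i + 1) (innerA s w[i] j + 1) (by omega) (by omega) (by omega)
        · rw [if_neg hlt] at hd ⊢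
          simp only [isSub, hd]
          simp
          omega
      · have hje : j = s.length := by omega
        subst hje
        rw [outerGo, dif_neg (by omega), List.drop_eq_getElem_cons hiw, List.drop_length]
        simp [isSub, dropTo]
        omega
    · subst hiw
      rw [outerGo, dif_neg (by omega)]
      simp [List.drop_length, isSub]

theorem checkA_eq_isSub (w s : List Char) : checkA w s = isSub w s := by
  have h := outerGo_eq_isSub w s s.length 0 0 (by omega) (by omega) (by omega)
  simp only [List.drop_zero] at h
  rw [checkA, Bool.eq_iff_iff, decide_eq_true_iff]
  exact h

-- A's sum over distinct keys weighted by multiplicities is the direct count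
theorem foldl_count_countP (words : List String) (p : String → Bool) :
    ((PySem.Set.ofList words).foldl
      (fun res w => if p w then res + ((words.count w : Int)) else res) 0)
      = (words.countP p : Int) := by
  rw [PySem.List.foldl_if_eq_foldl_filter, PySem.List.foldl_add]
  simp only [zero_add]
  have hnd : ((PySem.Set.ofList words).filter p).Nodup :=
    (PySem.Set.nodup_ofList words).filter p
  have hfin : ((PySem.Set.ofList words).filter p).toFinset = (words.filter p).toFinset := by
    ext x
    simp [PySem.Set.mem_ofList]
  calc (((PySem.Set.ofList words).filter p).map (fun w => (words.count w : Int))).sum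
      = ∑ x ∈ ((PySem.Set.ofList words).filter p).toFinset, (words.count x : Int) := by
        rw [List.sum_toFinset _ hnd]
    _ = ∑ x ∈ (words.filter p).toFinset, ((words.filter p).count x : Int) := by
        rw [hfin]
        apply Finset.sum_congr rfl
        intro x hx
        have hpx : p x := by
          simp [List.mem_toFinset] at hx
          exact hx.2
        rw [List.count_filter hpx]
    _ = (words.countP p : Int) := by
        rw [← Nat.cast_sum]
        rw [List.sum_toFinset_count_eq_length]
        simp [List.countP_eq_length_filter]

theorem portA_eq_countP (s : String) (words : List String) :
    numMatchingSubseq1 s words = (words.countP (fun w => isSub w.toList s.toList) : Int) := by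
  unfold numMatchingSubseq1
  simp only [PySem.Dict.keys, PySem.Dict.items_counter, List.map_map,
    PySem.Dict.getD_counter, checkA_eq_isSub]
  simp only [Function.comp_def, List.map_id']
  exact foldl_count_countP words _

-- ---- B-side: the bucket sweep computes the same count ----

-- simp facts about the greedy matcher
theorem isSub_nil_left (ss : List Char) : isSub [] ss = true := rfl

theorem isSub_cons_nil (c : Char) (t : List Char) : isSub (c :: t) [] = false := rfl

theorem isSub_cons_cons_self (c : Char) (t rest : List Char) :
    isSub (c :: t) (c :: rest) = isSub t rest := by
  simp [isSub, dropTo]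

theorem isSub_cons_cons_ne {c' c : Char} (h : c' ≠ c) (t rest : List Char) :
    isSub (c' :: t) (c :: rest) = isSub (c' :: t) rest := by
  conv_lhs => rw [isSub]
  conv_rhs => rw [isSub]
  rw [dropTo, if_neg (Ne.symm h)]

-- number of pending bucket entries that would still match `rest`
-- (an entry t in bucket c stands for the remaining word c :: t)
def pend (its : List (Char × List (List Char))) (rest : List Char) : Nat :=
  (its.map (fun pr => pr.2.countP (fun t => isSub (pr.1 :: t) rest))).sum

theorem pend_nil (its : List (Char × List (List Char))) : pend its [] = 0 := by
  unfold pend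
  rw [List.sum_eq_zero]
  intro x hx
  simp only [List.mem_map] at hx
  obtain ⟨pr, _, rfl⟩ := hx
  simp [isSub_cons_nil]

theorem pend_of_ne_key (c : Char) (rest : List Char) (its : List (Char × List (List Char)))
    (h : ∀ p ∈ its, p.1 ≠ c) : pend its (c :: rest) = pend its rest := by
  unfold pend
  congr 1
  apply List.map_congr_left
  intro pr hpr
  apply List.countP_congr
  intro t _
  rw [isSub_cons_cons_ne (h pr hpr)]

-- nodup keys through erase
theorem nodup_keys_erase {d : PySem.Dict Char (List (List Char))} (c : Char)
    (hn : d.keys.Nodup) : (d.erase c).keys.Nodup := by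
  apply List.Nodup.sublist _ hn
  exact List.Sublist.map _ List.filter_sublist

-- splitting off one bucket: pend = bucket c's pending + pend of the rest
theorem pend_split (c : Char) (rest : List Char) :
    ∀ (d : PySem.Dict Char (List (List Char))), d.keys.Nodup →
      pend d.items rest
        = (d.getD c []).countP (fun t => isSub (c :: t) rest) + pend (d.erase c).items rest := by
  intro d
  obtain ⟨its⟩ := d
  induction its with
  | nil => simp [pend, PySem.Dict.erase, PySem.Dict.getD, PySem.Dict.get?]
  | cons p its ih =>
    intro hn
    obtain ⟨k, l⟩ := p
    simp only [PySem.Dict.keys, List.map_cons, List.nodup_cons, List.mem_map] at hn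
    by_cases hk : k = c
    · subst hk
      have hrest : List.filter (fun p => !p.1 == k) its = its := by
        apply List.filter_eq_self.mpr
        intro p hp
        simp only [Bool.not_eq_eq_eq_not, Bool.not_true, beq_eq_false_iff_ne]
        intro hpk
        exact hn.1 ⟨p, hp, hpk⟩
      simp [pend, PySem.Dict.getD, PySem.Dict.get?, PySem.Dict.erase, hrest]
    · have hke : (k == c) = false := beq_eq_false_iff_ne.mpr hk
      have ihh := ih hn.2
      simp only [PySem.Dict.getD, PySem.Dict.get?, PySem.Dict.erase,
        List.find?_cons, hke, List.filter_cons, Bool.not_false, if_true] at ihh ⊢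
      simp only [pend, List.map_cons, List.sum_cons] at ihh ⊢
      omega

-- the bucket map outside key c is untouched by an insert at c
theorem erase_insert_self (d : PySem.Dict Char (List (List Char))) (c : Char)
    (v : List (List Char)) : (d.insert c v).erase c = d.erase c := by
  apply PySem.Dict.ext
  by_cases hcont : d.contains c = true
  · simp only [PySem.Dict.erase, PySem.Dict.insert, hcont, if_true, List.filter_map]
    have h1 : List.filter ((fun p => !p.1 == c) ∘
        (fun p => if (p.1 == c) = true then (c, v) else p)) d.items
        = List.filter (fun p => !p.1 == c) d.items := by
      apply List.filter_congr
      intro x _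
      by_cases hx : (x.1 == c) = true
      · simp [Function.comp, hx]
      · simp [Function.comp, hx]
    rw [h1]
    apply List.map_congr_left _ |>.trans (List.map_id _)
    intro x hx
    have : (x.1 == c) = false := by
      have := (List.mem_filter.mp hx).2
      simpa using this
    simp [this]
  · simp only [PySem.Dict.erase, PySem.Dict.insert, eq_false_of_ne_true hcont]
    simp

-- appending one suffix to its bucket adds exactly its pending bit
theorem pend_modify (c : Char) (t rest : List Char)
    (d : PySem.Dict Char (List (List Char))) (hn : d.keys.Nodup) :
    pend (d.modify c [] (· ++ [t])).items rest
      = pend d.items rest + (if isSub (c :: t) rest then 1 else 0) := by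
  have hn' : (d.modify c [] (· ++ [t])).keys.Nodup :=
    PySem.Dict.nodup_keys_insert d c _ hn
  rw [pend_split c rest _ hn', pend_split c rest d hn,
    PySem.Dict.getD_modify_self]
  have herase : (d.modify c [] (· ++ [t])).erase c = d.erase c :=
    erase_insert_self d c _
  rw [herase, List.countP_append]
  simp [List.countP_cons]
  omega

-- one pass of pvStep over a list of suffixes: res grows by the number of matchable ones
theorem pvStep_fold (rest : List Char) :
    ∀ (xs : List (List Char)) (res : Int) (d : PySem.Dict Char (List (List Char))),
      d.keys.Nodup →
      (xs.foldl pvStep (res, d)).2.keys.Nodup ∧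
      (xs.foldl pvStep (res, d)).1 + (pend (xs.foldl pvStep (res, d)).2.items rest : Int)
        = res + (pend d.items rest : Int) + (xs.countP (fun t => isSub t rest) : Int) := by
  intro xs
  induction xs with
  | nil => intro res d hn; simp [hn]
  | cons suf xs ih =>
    intro res d hn
    match suf with
    | [] =>
      have := ih (res + 1) d hn
      simp only [List.foldl_cons, pvStep, List.countP_cons, isSub_nil_left] at this ⊢
      refine ⟨this.1, ?_⟩
      rw [this.2]
      push_cast
      ring
    | c :: t =>
      have hn' : (d.modify c [] (· ++ [t])).keys.Nodup :=
        PySem.Dict.nodup_keys_insert d c _ hn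
      have := ih res (d.modify c [] (· ++ [t])) hn'
      simp only [List.foldl_cons, pvStep, List.countP_cons] at this ⊢
      refine ⟨this.1, ?_⟩
      rw [this.2, pend_modify c t rest d hn]
      split_ifs <;> push_cast <;> ring

-- the sweep over s: the final res plus pending (none) equals initial res plus pending vs s
theorem sweep_fold :
    ∀ (cs : List Char) (st : Int × PySem.Dict Char (List (List Char))),
      st.2.keys.Nodup →
      (cs.foldl (fun st c => (st.2.getD c []).foldl pvStep (st.1, st.2.erase c)) st).1
        + (pend (cs.foldl (fun st c => (st.2.getD c []).foldl pvStep (st.1, st.2.erase c)) st).2.items [] : Int)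
        = st.1 + (pend st.2.items cs : Int) := by
  intro cs
  induction cs with
  | nil => intro st hn; rfl
  | cons c cs ih =>
    intro st hn
    have hne : (st.2.erase c).keys.Nodup := nodup_keys_erase c hn
    have hstep := pvStep_fold cs (st.2.getD c []) st.1 (st.2.erase c) hne
    have hrec := ih _ hstep.1
    simp only [List.foldl_cons]
    rw [hrec, hstep.2]
    rw [pend_split c (c :: cs) st.2 hn]
    rw [pend_of_ne_key c cs _ ?hkeys]
    case hkeys =>
      intro p hp
      simp only [PySem.Dict.erase, List.mem_filter,
        Bool.not_eq_eq_eq_not, Bool.not_true, beq_eq_false_iff_ne] at hp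
      exact hp.2
    have hcnt : (st.2.getD c []).countP (fun t => isSub (c :: t) (c :: cs))
        = (st.2.getD c []).countP (fun t => isSub t cs) := by
      apply List.countP_congr
      intro t _
      rw [isSub_cons_cons_self]
    rw [hcnt]
    push_cast
    ring

theorem portB_eq_countP (s : String) (words : List String) :
    numMatchingSubseq1_alt s words = (words.countP (fun w => isSub w.toList s.toList) : Int) := by
  unfold numMatchingSubseq1_alt
  have hinit := pvStep_fold s.toList (words.map String.toList) 0
    (PySem.Dict.empty : PySem.Dict Char (List (List Char))) (by simp [PySem.Dict.keys, PySem.Dict.empty])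
  rw [List.foldl_map] at hinit
  have hsweep := sweep_fold s.toList _ hinit.1
  simp only [pend_nil, Nat.cast_zero, add_zero] at hsweep
  rw [hsweep, hinit.2]
  simp [pend, PySem.Dict.empty, List.countP_map, Function.comp_def]

-- ===== VERDICT (by name: the statement is the Claim_ definition above) =====
theorem numMatchingSubseq1_spec : Claim_equal_numMatchingSubseq1 := by
  intro s words _
  show numMatchingSubseq1 s words = numMatchingSubseq1_alt s words
  rw [portA_eq_countP, portB_eq_countP]
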